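-- pv_equiv track=rewrite | github.com/scrapedat/frankenstein-db | src/website_dna.py | encode_frameworks
-- ===== SOURCE A (Python) =====
-- def encode_frameworks(frameworks: list[str]) -> int:
--     """Encode frameworks as bit flags for efficient storage"""
--     framework_map = {
--         'react': 1, 'vue': 2, 'angular': 4, 'jquery': 8,
--         'bootstrap': 16, 'tailwind': 32, 'webpack': 64,
--         'gatsby': 128, 'nextjs': 256, 'svelte': 512
--     }
--
--     flags = 0
--     for fw in frameworks:
--         if fw in framework_map:
--             flags |= framework_map[fw]
--
--     return flags
-- ===== SOURCE B (Python) =====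
-- def encode_frameworks(frameworks: list[str]) -> int:
--     """Encode frameworks as bit flags for efficient storage"""
--     names = ['react', 'vue', 'angular', 'jquery', 'bootstrap',
--              'tailwind', 'webpack', 'gatsby', 'nextjs', 'svelte']
--     present = set(frameworks)
--     return sum(2 ** i for i, name in enumerate(names) if name in present)
-- ===== Notes on version B (the rewrite author's own statement) =====
-- stated objective: alternative
-- what changed: B replaces A's OR-accumulating loop over the input with a sum of powers of two over the fixed ordered name list, testing membership in a set built once from the input; since the bits are distinct powers of two each counted at most once, the sum equals the OR.
import Mathlib
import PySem

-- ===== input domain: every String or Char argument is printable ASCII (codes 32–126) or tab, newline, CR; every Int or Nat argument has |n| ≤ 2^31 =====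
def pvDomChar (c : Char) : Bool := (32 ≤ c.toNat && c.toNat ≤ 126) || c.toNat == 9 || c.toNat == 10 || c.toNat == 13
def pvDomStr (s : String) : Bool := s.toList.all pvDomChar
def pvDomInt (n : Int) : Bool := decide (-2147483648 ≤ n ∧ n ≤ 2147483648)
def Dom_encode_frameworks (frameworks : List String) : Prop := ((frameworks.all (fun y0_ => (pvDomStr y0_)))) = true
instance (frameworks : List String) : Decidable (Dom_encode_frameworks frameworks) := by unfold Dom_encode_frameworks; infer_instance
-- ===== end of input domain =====

-- B sums 2^i over the fixed ordered name list for the names present in a set built once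
-- from the input, instead of A's OR-accumulating loop over the input (objective: alternative).

-- ===== PORT A =====
-- the dict literal framework_map
def pvFwMap : PySem.Dict String Int :=
  PySem.Dict.ofList [("react", 1), ("vue", 2), ("angular", 4), ("jquery", 8), ("bootstrap", 16), ("tailwind", 32), ("webpack", 64), ("gatsby", 128), ("nextjs", 256), ("svelte", 512)]

-- the loop body: 'if fw in framework_map: flags |= framework_map[fw]'
def pvStepA (flags : Int) (fw : String) : Int :=
  if pvFwMap.contains fw then
    match pvFwMap.get? fw with
    | some v => PySem.Int.bor flags v
    | none => flags
  else flags

def encode_frameworks (frameworks : List String) : Int :=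
  frameworks.foldl pvStepA 0

-- ===== PORT B =====
-- the 'names' list of Source B
def pvNames : List String := ["react", "vue", "angular", "jquery", "bootstrap", "tailwind", "webpack", "gatsby", "nextjs", "svelte"]

-- sum(2 ** i for i, name in enumerate(names) if name in present); the enumerate index i is a
-- nonnegative Int, so '2 ** i' is ported exactly as '2 ^ p.1.toNat'
def encode_frameworks_alt (frameworks : List String) : Int :=
  let present : PySem.Set String := PySem.Set.ofList frameworks
  (PySem.List.enumerate pvNames).foldl
    (fun acc p => if PySem.Set.contains present p.2 then acc + 2 ^ p.1.toNat else acc) 0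

-- ===== PRECONDITION & SPEC =====
def Spec_encode_frameworks (frameworks : List String) (out : Int) : Prop := out = encode_frameworks_alt frameworks
instance (frameworks : List String) (out : Int) : Decidable (Spec_encode_frameworks frameworks out) := by unfold Spec_encode_frameworks; infer_instance

-- ===== CLAIM (what is proved, stated in full; the proofs are below) =====
def Claim_equal_encode_frameworks : Prop := ∀ (frameworks : List String), Dom_encode_frameworks frameworks → Spec_encode_frameworks frameworks (encode_frameworks frameworks)

-- ===== LEMMAS AND PROOFS =====

-- the bit a framework name contributes (0 for unknown names), as a Nat
def pvBit (fw : String) : Nat :=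
  if fw = "react" then 1
  else if fw = "vue" then 2
  else if fw = "angular" then 4
  else if fw = "jquery" then 8
  else if fw = "bootstrap" then 16
  else if fw = "tailwind" then 32
  else if fw = "webpack" then 64
  else if fw = "gatsby" then 128
  else if fw = "nextjs" then 256
  else if fw = "svelte" then 512
  else 0

-- canonical form of A: OR of one membership-test term per mapped framework
def pvC (l : List String) (m : Nat) : Nat :=
  ((((((((((m ||| (if "react" ∈ l then 1 else 0)) ||| (if "vue" ∈ l then 2 else 0)) ||| (if "angular" ∈ l then 4 else 0)) ||| (if "jquery" ∈ l then 8 else 0)) ||| (if "bootstrap" ∈ l then 16 else 0)) ||| (if "tailwind" ∈ l then 32 else 0)) ||| (if "webpack" ∈ l then 64 else 0)) ||| (if "gatsby" ∈ l then 128 else 0)) ||| (if "nextjs" ∈ l then 256 else 0)) ||| (if "svelte" ∈ l then 512 else 0))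

-- A's canonical form with the ten membership tests abstracted as Bools
def pvA10 (c1 c2 c3 c4 c5 c6 c7 c8 c9 c10 : Bool) : Nat :=
  ((((((((((0 ||| cond c1 1 0) ||| cond c2 2 0) ||| cond c3 4 0) ||| cond c4 8 0) ||| cond c5 16 0) ||| cond c6 32 0) ||| cond c7 64 0) ||| cond c8 128 0) ||| cond c9 256 0) ||| cond c10 512 0)

-- one step of B's fold, and B's value with the ten membership tests abstracted as Bools
def pvStepB (c : Bool) (v acc : Int) : Int := if c then acc + v else acc

def pvB10 (c1 c2 c3 c4 c5 c6 c7 c8 c9 c10 : Bool) : Int :=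
  pvStepB c10 512 (pvStepB c9 256 (pvStepB c8 128 (pvStepB c7 64 (pvStepB c6 32 (pvStepB c5 16 (pvStepB c4 8 (pvStepB c3 4 (pvStepB c2 2 (pvStepB c1 1 0)))))))))

theorem pvStepA_eq (m : Nat) (fw : String) :
    pvStepA ((m : Nat) : Int) fw = ((m ||| pvBit fw : Nat) : Int) := by
  by_cases hreact : fw = "react"
  · subst hreact
    have hg : pvFwMap.get? "react" = some 1 := rfl
    simp only [pvStepA, show pvFwMap.contains "react" = true from rfl, if_true, hg,
      show pvBit "react" = 1 by simp [pvBit]]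
    exact_mod_cast PySem.Int.bor_natCast m 1
  by_cases hvue : fw = "vue"
  · subst hvue
    have hg : pvFwMap.get? "vue" = some 2 := rfl
    simp only [pvStepA, show pvFwMap.contains "vue" = true from rfl, if_true, hg,
      show pvBit "vue" = 2 by simp [pvBit]]
    exact_mod_cast PySem.Int.bor_natCast m 2
  by_cases hangular : fw = "angular"
  · subst hangular
    have hg : pvFwMap.get? "angular" = some 4 := rfl
    simp only [pvStepA, show pvFwMap.contains "angular" = true from rfl, if_true, hg,
      show pvBit "angular" = 4 by simp [pvBit]]
    exact_mod_cast PySem.Int.bor_natCast m 4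
  by_cases hjquery : fw = "jquery"
  · subst hjquery
    have hg : pvFwMap.get? "jquery" = some 8 := rfl
    simp only [pvStepA, show pvFwMap.contains "jquery" = true from rfl, if_true, hg,
      show pvBit "jquery" = 8 by simp [pvBit]]
    exact_mod_cast PySem.Int.bor_natCast m 8
  by_cases hbootstrap : fw = "bootstrap"
  · subst hbootstrap
    have hg : pvFwMap.get? "bootstrap" = some 16 := rfl
    simp only [pvStepA, show pvFwMap.contains "bootstrap" = true from rfl, if_true, hg,
      show pvBit "bootstrap" = 16 by simp [pvBit]]
    exact_mod_cast PySem.Int.bor_natCast m 16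
  by_cases htailwind : fw = "tailwind"
  · subst htailwind
    have hg : pvFwMap.get? "tailwind" = some 32 := rfl
    simp only [pvStepA, show pvFwMap.contains "tailwind" = true from rfl, if_true, hg,
      show pvBit "tailwind" = 32 by simp [pvBit]]
    exact_mod_cast PySem.Int.bor_natCast m 32
  by_cases hwebpack : fw = "webpack"
  · subst hwebpack
    have hg : pvFwMap.get? "webpack" = some 64 := rfl
    simp only [pvStepA, show pvFwMap.contains "webpack" = true from rfl, if_true, hg,
      show pvBit "webpack" = 64 by simp [pvBit]]
    exact_mod_cast PySem.Int.bor_natCast m 64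
  by_cases hgatsby : fw = "gatsby"
  · subst hgatsby
    have hg : pvFwMap.get? "gatsby" = some 128 := rfl
    simp only [pvStepA, show pvFwMap.contains "gatsby" = true from rfl, if_true, hg,
      show pvBit "gatsby" = 128 by simp [pvBit]]
    exact_mod_cast PySem.Int.bor_natCast m 128
  by_cases hnextjs : fw = "nextjs"
  · subst hnextjs
    have hg : pvFwMap.get? "nextjs" = some 256 := rfl
    simp only [pvStepA, show pvFwMap.contains "nextjs" = true from rfl, if_true, hg,
      show pvBit "nextjs" = 256 by simp [pvBit]]
    exact_mod_cast PySem.Int.bor_natCast m 256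
  by_cases hsvelte : fw = "svelte"
  · subst hsvelte
    have hg : pvFwMap.get? "svelte" = some 512 := rfl
    simp only [pvStepA, show pvFwMap.contains "svelte" = true from rfl, if_true, hg,
      show pvBit "svelte" = 512 by simp [pvBit]]
    exact_mod_cast PySem.Int.bor_natCast m 512
  have hitems : pvFwMap.items = [("react", 1), ("vue", 2), ("angular", 4), ("jquery", 8), ("bootstrap", 16), ("tailwind", 32), ("webpack", 64), ("gatsby", 128), ("nextjs", 256), ("svelte", 512)] := rfl
  have hc : pvFwMap.contains fw = false := by
    rw [PySem.Dict.contains, hitems]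
    simp [Ne.symm hreact, Ne.symm hvue, Ne.symm hangular, Ne.symm hjquery, Ne.symm hbootstrap, Ne.symm htailwind, Ne.symm hwebpack, Ne.symm hgatsby, Ne.symm hnextjs, Ne.symm hsvelte]
  have hb : pvBit fw = 0 := by simp [pvBit, hreact, hvue, hangular, hjquery, hbootstrap, htailwind, hwebpack, hgatsby, hnextjs, hsvelte]
  simp [pvStepA, hc, hb]

theorem encA_fold (l : List String) : ∀ m : Nat,
    l.foldl pvStepA ((m : Nat) : Int) = ((l.foldl (fun f fw => f ||| pvBit fw) m : Nat) : Int) := by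
  induction l with
  | nil => intro m; simp
  | cons fw t ih =>
    intro m
    rw [List.foldl_cons, pvStepA_eq, ih, List.foldl_cons]

set_option maxHeartbeats 2000000 in
theorem orC (l : List String) : ∀ m : Nat,
    l.foldl (fun f fw => f ||| pvBit fw) m = pvC l m := by
  induction l with
  | nil => intro m; simp [pvC]
  | cons fw t ih =>
    intro m
    rw [List.foldl_cons, ih]
    by_cases hreact : fw = "react"
    · subst hreact
      by_cases hm : ("react" : String) ∈ t <;>
        simp [pvC, pvBit, List.mem_cons, hm, Nat.or_assoc, Nat.or_comm, Nat.or_left_comm, Nat.or_self]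
    by_cases hvue : fw = "vue"
    · subst hvue
      by_cases hm : ("vue" : String) ∈ t <;>
        simp [pvC, pvBit, List.mem_cons, hm, Nat.or_assoc, Nat.or_comm, Nat.or_left_comm, Nat.or_self]
    by_cases hangular : fw = "angular"
    · subst hangular
      by_cases hm : ("angular" : String) ∈ t <;>
        simp [pvC, pvBit, List.mem_cons, hm, Nat.or_assoc, Nat.or_comm, Nat.or_left_comm, Nat.or_self]
    by_cases hjquery : fw = "jquery"
    · subst hjquery
      by_cases hm : ("jquery" : String) ∈ t <;>
        simp [pvC, pvBit, List.mem_cons, hm, Nat.or_assoc, Nat.or_comm, Nat.or_left_comm, Nat.or_self]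
    by_cases hbootstrap : fw = "bootstrap"
    · subst hbootstrap
      by_cases hm : ("bootstrap" : String) ∈ t <;>
        simp [pvC, pvBit, List.mem_cons, hm, Nat.or_assoc, Nat.or_comm, Nat.or_left_comm, Nat.or_self]
    by_cases htailwind : fw = "tailwind"
    · subst htailwind
      by_cases hm : ("tailwind" : String) ∈ t <;>
        simp [pvC, pvBit, List.mem_cons, hm, Nat.or_assoc, Nat.or_comm, Nat.or_left_comm, Nat.or_self]
    by_cases hwebpack : fw = "webpack"
    · subst hwebpack
      by_cases hm : ("webpack" : String) ∈ t <;>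
        simp [pvC, pvBit, List.mem_cons, hm, Nat.or_assoc, Nat.or_comm, Nat.or_left_comm, Nat.or_self]
    by_cases hgatsby : fw = "gatsby"
    · subst hgatsby
      by_cases hm : ("gatsby" : String) ∈ t <;>
        simp [pvC, pvBit, List.mem_cons, hm, Nat.or_assoc, Nat.or_comm, Nat.or_left_comm, Nat.or_self]
    by_cases hnextjs : fw = "nextjs"
    · subst hnextjs
      by_cases hm : ("nextjs" : String) ∈ t <;>
        simp [pvC, pvBit, List.mem_cons, hm, Nat.or_assoc, Nat.or_comm, Nat.or_left_comm, Nat.or_self]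
    by_cases hsvelte : fw = "svelte"
    · subst hsvelte
      by_cases hm : ("svelte" : String) ∈ t <;>
        simp [pvC, pvBit, List.mem_cons, hm, Nat.or_assoc, Nat.or_comm, Nat.or_left_comm, Nat.or_self]
    have hb : pvBit fw = 0 := by simp [pvBit, hreact, hvue, hangular, hjquery, hbootstrap, htailwind, hwebpack, hgatsby, hnextjs, hsvelte]
    simp [pvC, hb, List.mem_cons, Ne.symm hreact, Ne.symm hvue, Ne.symm hangular, Ne.symm hjquery, Ne.symm hbootstrap, Ne.symm htailwind, Ne.symm hwebpack, Ne.symm hgatsby, Ne.symm hnextjs, Ne.symm hsvelte]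

-- pvC with memberships abstracted
theorem pvC_eq_A10 (l : List String) :
    pvC l 0 = pvA10 (decide ("react" ∈ l)) (decide ("vue" ∈ l)) (decide ("angular" ∈ l)) (decide ("jquery" ∈ l)) (decide ("bootstrap" ∈ l)) (decide ("tailwind" ∈ l)) (decide ("webpack" ∈ l)) (decide ("gatsby" ∈ l)) (decide ("nextjs" ∈ l)) (decide ("svelte" ∈ l)) := by
  simp only [pvC, pvA10, Bool.cond_decide]

theorem contains_ofList_eq (l : List String) (x : String) :
    PySem.Set.contains (PySem.Set.ofList l) x = decide (x ∈ l) := by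
  by_cases hx : x ∈ l <;> simp [hx]

-- B's fold over the concrete enumerated names, with memberships abstracted
theorem altB (l : List String) :
    encode_frameworks_alt l = pvB10 (decide ("react" ∈ l)) (decide ("vue" ∈ l)) (decide ("angular" ∈ l)) (decide ("jquery" ∈ l)) (decide ("bootstrap" ∈ l)) (decide ("tailwind" ∈ l)) (decide ("webpack" ∈ l)) (decide ("gatsby" ∈ l)) (decide ("nextjs" ∈ l)) (decide ("svelte" ∈ l)) := by
  show (PySem.List.enumerate pvNames).foldl
      (fun acc p => if PySem.Set.contains (PySem.Set.ofList l) p.2 then acc + 2 ^ p.1.toNat else acc) 0 = _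
  have he : PySem.List.enumerate pvNames = [((0 : Int), "react"), (1, "vue"), (2, "angular"), (3, "jquery"), (4, "bootstrap"), (5, "tailwind"), (6, "webpack"), (7, "gatsby"), (8, "nextjs"), (9, "svelte")] := by
    simp [pvNames, PySem.List.enumerate_cons, PySem.List.enumerate_nil]
  rw [he]
  simp only [List.foldl_cons, List.foldl_nil, contains_ofList_eq, pvB10, pvStepB]
  norm_num [Int.toNat]

theorem a10_eq_b10 : ∀ c1 c2 c3 c4 c5 c6 c7 c8 c9 c10 : Bool,
    ((pvA10 c1 c2 c3 c4 c5 c6 c7 c8 c9 c10 : Nat) : Int) = pvB10 c1 c2 c3 c4 c5 c6 c7 c8 c9 c10 := by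
  decide

-- ===== VERDICT (by name: the statement is the Claim_ definition above) =====
theorem encode_frameworks_spec : Claim_equal_encode_frameworks := by
  intro l _
  show encode_frameworks l = encode_frameworks_alt l
  have h0 : encode_frameworks l = l.foldl pvStepA ((0 : Nat) : Int) := rfl
  rw [h0, encA_fold, orC, pvC_eq_A10, a10_eq_b10, altB]
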